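-- pv_equiv track=rewrite | github.com/misgnros/pdf-semiauto-bookmark | pdf_semiauto_bookmark/format_bookmark.py | bookmark_list_to_md
-- ===== SOURCE A (Python) =====
-- def bookmark_list_to_md(bookmark_list):
--     """
--     入力: [[level:int, title:str, page:int], ...]
--     出力: 指定フォーマットのマークダウンテキスト
--     """
--     from collections import defaultdict
--
--     # ページごとに見出しをまとめる
--     page_dict = defaultdict(list)
--     for level, title, page in bookmark_list:
--         page_dict[page].append((level, title))
--
--     # ページ番号で昇順に並べる
--     md_lines = []
--     for page in sorted(page_dict.keys()):
--         md_lines.append(f"<!-- page {page} -->")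
--         for level, title in page_dict[page]:
--             md_lines.append(f"{'#' * level} {title}")
--
--     return "\n".join(md_lines)
-- ===== SOURCE B (Python) =====
-- def bookmark_list_to_md(bookmark_list):
--     """
--     入力: [[level:int, title:str, page:int], ...]
--     出力: 指定フォーマットのマークダウンテキスト
--     """
--     md_lines = []
--     current_page = None
--     for level, title, page in sorted(bookmark_list, key=lambda bm: bm[2]):
--         if current_page != page:
--             md_lines.append(f"<!-- page {page} -->")
--             current_page = page
--         md_lines.append(f"{'#' * level} {title}")
--     return "\n".join(md_lines)
-- ===== Notes on version B (the rewrite author's own statement) =====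
-- stated objective: simpler
-- what changed: Replaces the defaultdict page-grouping plus a nested loop over sorted keys by one stable sort of the bookmark list on page followed by a single pass with a current-page sentinel that emits the page header on change.
import Mathlib
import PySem

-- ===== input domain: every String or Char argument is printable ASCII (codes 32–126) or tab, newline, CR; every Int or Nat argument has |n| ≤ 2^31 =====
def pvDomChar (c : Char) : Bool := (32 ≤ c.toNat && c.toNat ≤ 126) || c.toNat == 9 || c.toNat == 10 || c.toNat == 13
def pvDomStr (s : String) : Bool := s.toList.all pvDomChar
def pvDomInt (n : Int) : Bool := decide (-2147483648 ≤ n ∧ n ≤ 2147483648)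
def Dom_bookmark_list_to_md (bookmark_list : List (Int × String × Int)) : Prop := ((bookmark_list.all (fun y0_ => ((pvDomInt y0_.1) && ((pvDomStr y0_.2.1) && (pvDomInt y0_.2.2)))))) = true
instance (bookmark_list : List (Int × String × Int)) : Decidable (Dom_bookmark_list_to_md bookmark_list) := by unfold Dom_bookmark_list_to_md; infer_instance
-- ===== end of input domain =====

-- B replaces A's defaultdict grouping + nested loop over sorted keys by one stable sort on the
-- page followed by a single pass with current-page change detection (objective: simpler).

-- ===== PORT A =====
def bookmark_list_to_md (bookmark_list : List (Int × String × Int)) : String :=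
  -- page_dict = defaultdict(list); for level, title, page in bookmark_list: page_dict[page].append((level, title))
  let page_dict : PySem.Dict Int (List (Int × String)) :=
    bookmark_list.foldl (fun d bm => d.modify bm.2.2 [] (fun xs => xs ++ [(bm.1, bm.2.1)]))
      PySem.Dict.empty
  -- for page in sorted(page_dict.keys()): append header; for level, title in page_dict[page]: append heading
  let md_lines : List String :=
    (PySem.List.sorted page_dict.keys (fun p => p) false).foldl
      (fun md_lines page =>
        (page_dict.getD page []).foldl
          (fun md_lines lt =>
            md_lines ++ [String.ofList (PySem.List.pyRepeat ['#'] lt.1) ++ " " ++ lt.2])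
          (md_lines ++ ["<!-- page " ++ PySem.Int.toStr page ++ " -->"]))
      []
  PySem.Str.join "\n" md_lines

-- ===== PORT B =====
def bookmark_list_to_md_alt (bookmark_list : List (Int × String × Int)) : String :=
  -- one pass over sorted(bookmark_list, key=lambda bm: bm[2]) with a current_page sentinel
  let r : List String × Option Int :=
    (PySem.List.sorted bookmark_list (fun bm => bm.2.2) false).foldl
      (fun (st : List String × Option Int) bm =>
        let st := if st.2 ≠ some bm.2.2 then
            (st.1 ++ ["<!-- page " ++ PySem.Int.toStr bm.2.2 ++ " -->"], some bm.2.2)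
          else st
        (st.1 ++ [String.ofList (PySem.List.pyRepeat ['#'] bm.1) ++ " " ++ bm.2.1], st.2))
      ([], none)
  PySem.Str.join "\n" r.1

-- ===== PRECONDITION & SPEC =====
def Spec_bookmark_list_to_md (bookmark_list : List (Int × String × Int)) (out : String) : Prop := out = bookmark_list_to_md_alt bookmark_list
instance (bookmark_list : List (Int × String × Int)) (out : String) : Decidable (Spec_bookmark_list_to_md bookmark_list out) := by unfold Spec_bookmark_list_to_md; infer_instance

-- ===== CLAIM (what is proved, stated in full; the proofs are below) =====
def Claim_equal_bookmark_list_to_md : Prop := ∀ (bookmark_list : List (Int × String × Int)), Dom_bookmark_list_to_md bookmark_list → Spec_bookmark_list_to_md bookmark_list (bookmark_list_to_md bookmark_list)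

-- ===== LEMMAS AND PROOFS =====

-- abbreviations used only by the proofs
def pvKey (bm : Int × String × Int) : Int := bm.2.2
def pvHd (bm : Int × String × Int) : String :=
  String.ofList (PySem.List.pyRepeat ['#'] bm.1) ++ " " ++ bm.2.1
def pvHdr (p : Int) : String := "<!-- page " ++ PySem.Int.toStr p ++ " -->"
def pvGrp (xs : List (Int × String × Int)) (q : Int) : List (Int × String × Int) :=
  xs.filter (fun bm => pvKey bm == q)
def pvSK (xs : List (Int × String × Int)) : List Int :=
  PySem.List.sorted (PySem.Set.ofList (xs.map pvKey)) (fun p => p) false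
def pvFlat (xs : List (Int × String × Int)) : List (Int × String × Int) :=
  (pvSK xs).flatMap (pvGrp xs)
def pvOut (xs : List (Int × String × Int)) : List String :=
  (pvSK xs).flatMap (fun q => pvHdr q :: (pvGrp xs q).map pvHd)

theorem pv_insertBy_append {α : Type} (before : α → α → Bool) (x : α) (P S : List α)
    (h : ∀ a ∈ P, before x a = false) :
    PySem.List.insertBy before x (P ++ S) = P ++ PySem.List.insertBy before x S := by
  induction P with
  | nil => rfl
  | cons a P ih =>
    have ha := h a (by simp)
    simp only [List.cons_append, PySem.List.insertBy, ha, Bool.false_eq_true, if_false]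
    rw [ih (fun b hb => h b (by simp [hb]))]

theorem pv_insertBy_all_before {α : Type} (before : α → α → Bool) (x : α) (S : List α)
    (h : ∀ a ∈ S, before x a = true) :
    PySem.List.insertBy before x S = x :: S := by
  cases S with
  | nil => rfl
  | cons a S => simp only [PySem.List.insertBy, h a (by simp), if_true]

theorem pv_mem_SK (xs : List (Int × String × Int)) (q : Int) :
    q ∈ pvSK xs ↔ q ∈ xs.map pvKey := by
  unfold pvSK
  rw [PySem.List.mem_sorted, PySem.Set.mem_ofList]

theorem pv_SK_pairwise (xs : List (Int × String × Int)) :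
    (pvSK xs).Pairwise (· < ·) := PySem.List.sorted_ofList_pairwise_lt _

theorem pv_dropWhile_ge (v : Int) (l : List Int) (h : l.Pairwise (· < ·)) :
    ∀ b ∈ l.dropWhile (fun a => decide (a < v)), v ≤ b := by
  induction l with
  | nil => simp
  | cons a l ih =>
    intro b hb
    by_cases hav : a < v
    · simp only [List.dropWhile_cons, hav, decide_true] at hb
      exact ih (List.Pairwise.of_cons h) b hb
    · simp only [List.dropWhile_cons, hav, decide_false] at hb
      rcases List.mem_cons.mp hb with rfl | hb
      · omega
      · have := (List.pairwise_cons.mp h).1 b hb; omega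

theorem pv_keyIn (p : List (Int × String × Int)) (l : List Int) (a : Int × String × Int)
    (h : a ∈ l.flatMap (pvGrp p)) : a.2.2 ∈ l := by
  rcases List.mem_flatMap.mp h with ⟨q, hq, ha⟩
  have := List.of_mem_filter ha
  have : a.2.2 = q := by simpa [pvKey] using this
  rwa [this]

theorem pv_SK_append (p : List (Int × String × Int)) (x : Int × String × Int)
    (ks' : List Int) (hpair : ks'.Pairwise (· < ·))
    (hmem : ∀ q, q ∈ ks' ↔ q ∈ p.map pvKey ∨ q = x.2.2) :
    pvSK (p ++ [x]) = ks' := by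
  unfold pvSK
  apply PySem.List.sorted_eq_of_perm_of_pairwise_lt
  · rw [List.perm_ext_iff_of_nodup (hpair.imp (fun h => ne_of_lt h)) (PySem.Set.nodup_ofList _)]
    intro q
    rw [hmem, PySem.Set.mem_ofList]
    simp only [List.map_append, List.map_cons, List.map_nil, List.mem_append,
      List.mem_cons, List.not_mem_nil, or_false, pvKey]
  · simpa using hpair

theorem pv_grp_append (p : List (Int × String × Int)) (x : Int × String × Int) (q : Int) :
    pvGrp (p ++ [x]) q = pvGrp p q ++ (if x.2.2 = q then [x] else []) := by
  unfold pvGrp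
  rw [List.filter_append]
  congr 1
  by_cases h : x.2.2 = q <;> simp [pvKey, h]

-- key step: inserting x into the grouped form yields the grouped form of p ++ [x]
theorem pv_step (p : List (Int × String × Int)) (x : Int × String × Int) :
    PySem.List.insertBy (fun a b => decide (a.2.2 < b.2.2)) x (pvFlat p) = pvFlat (p ++ [x]) := by
  have hpair := pv_SK_pairwise p
  have hmem := pv_mem_SK p
  have hAB : (pvSK p).takeWhile (fun a => decide (a < x.2.2)) ++
      (pvSK p).dropWhile (fun a => decide (a < x.2.2)) = pvSK p :=
    List.takeWhile_append_dropWhile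
  set v := x.2.2 with hv
  set A := (pvSK p).takeWhile (fun a => decide (a < v)) with hdefA
  set B := (pvSK p).dropWhile (fun a => decide (a < v)) with hdefB
  have hA : ∀ a ∈ A, a < v := fun a ha => by simpa using List.mem_takeWhile_imp ha
  have hBge : ∀ b ∈ B, v ≤ b := pv_dropWhile_ge v (pvSK p) hpair
  have pairA : A.Pairwise (· < ·) := List.Pairwise.sublist (List.takeWhile_sublist _) hpair
  have pairB : B.Pairwise (· < ·) := List.Pairwise.sublist (List.dropWhile_sublist _) hpair
  have hflat : pvFlat p = A.flatMap (pvGrp p) ++ B.flatMap (pvGrp p) := by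
    rw [pvFlat, ← hAB, List.flatMap_append]
  by_cases hvk : v ∈ pvSK p
  · -- v already a key: x goes to the end of its group
    have hvB : v ∈ B := by
      have : v ∈ A ++ B := by rw [hAB]; exact hvk
      rcases List.mem_append.mp this with h | h
      · exact absurd (hA v h) (lt_irrefl v)
      · exact h
    obtain ⟨b0, B', hBc⟩ := List.exists_cons_of_ne_nil
      (show B ≠ [] by intro h; rw [h] at hvB; simp at hvB)
    have hb0 : b0 = v := by
      rcases List.mem_cons.mp (hBc ▸ hvB) with h | h
      · exact h.symm
      · have h1 := (List.pairwise_cons.mp (hBc ▸ pairB)).1 v h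
        have h2 := hBge b0 (by rw [hBc]; exact List.mem_cons_self)
        omega
    rw [hb0] at hBc
    have hB' : ∀ b ∈ B', v < b := (List.pairwise_cons.mp (hBc ▸ pairB)).1
    have hSK : pvSK (p ++ [x]) = pvSK p := by
      apply pv_SK_append p x _ hpair
      intro q
      rw [hmem]
      constructor
      · exact Or.inl
      · rintro (h | rfl)
        · exact h
        · exact (hmem v).mp hvk
    have hP : ∀ a ∈ A.flatMap (pvGrp p) ++ pvGrp p v,
        (fun a b => decide (a.2.2 < b.2.2)) x a = false := by
      intro a ha
      rcases List.mem_append.mp ha with h | h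
      · have := hA _ (pv_keyIn p A a h); simp only [decide_eq_false_iff_not]; omega
      · have : a.2.2 = v := by simpa [pvKey] using List.of_mem_filter h
        simp only [decide_eq_false_iff_not]; omega
    have hS : ∀ a ∈ B'.flatMap (pvGrp p),
        (fun a b => decide (a.2.2 < b.2.2)) x a = true := by
      intro a ha
      have := hB' _ (pv_keyIn p B' a ha)
      simp only [decide_eq_true_eq]; omega
    rw [hflat, hBc, List.flatMap_cons, ← List.append_assoc,
      pv_insertBy_append _ x _ _ hP, pv_insertBy_all_before _ x _ hS]
    unfold pvFlat
    rw [hSK]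
    conv_rhs => rw [← hAB, hBc]
    rw [List.flatMap_append, List.flatMap_cons]
    have eA : A.flatMap (pvGrp (p ++ [x])) = A.flatMap (pvGrp p) := by
      apply List.flatMap_congr
      intro q hq
      rw [pv_grp_append]
      have := hA q hq
      simp only [show ¬ x.2.2 = q by omega, if_false, List.append_nil]
    have eB : B'.flatMap (pvGrp (p ++ [x])) = B'.flatMap (pvGrp p) := by
      apply List.flatMap_congr
      intro q hq
      rw [pv_grp_append]
      have := hB' q hq
      simp only [show ¬ x.2.2 = q by omega, if_false, List.append_nil]
    rw [eA, eB, pv_grp_append, if_pos hv.symm]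
    simp [List.append_assoc]
  · -- v is a new key: x forms a fresh singleton group between A and B
    have hBgt : ∀ b ∈ B, v < b := by
      intro b hb
      have h1 := hBge b hb
      have h2 : b ≠ v := by
        intro h; apply hvk; rw [← h]; exact (List.dropWhile_sublist _).subset hb
      omega
    have pairKs' : (A ++ v :: B).Pairwise (· < ·) := by
      rw [List.pairwise_append]
      refine ⟨pairA, List.pairwise_cons.mpr ⟨hBgt, pairB⟩, ?_⟩
      intro a ha b hb
      have h1 := hA a ha
      rcases List.mem_cons.mp hb with rfl | hb
      · omega
      · have := hBgt b hb; omega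
    have hSK : pvSK (p ++ [x]) = A ++ v :: B := by
      apply pv_SK_append p x _ pairKs'
      intro q
      rw [← hmem, ← hAB]
      simp only [List.mem_append, List.mem_cons]
      tauto
    have hgv : pvGrp p v = [] := by
      apply List.filter_eq_nil_iff.mpr
      intro bm hbm
      simp only [pvKey, beq_iff_eq]
      intro h
      exact hvk ((hmem v).mpr (List.mem_map.mpr ⟨bm, hbm, h⟩))
    have hP : ∀ a ∈ A.flatMap (pvGrp p),
        (fun a b => decide (a.2.2 < b.2.2)) x a = false := by
      intro a ha
      have := hA _ (pv_keyIn p A a ha)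
      simp only [decide_eq_false_iff_not]; omega
    have hS : ∀ a ∈ B.flatMap (pvGrp p),
        (fun a b => decide (a.2.2 < b.2.2)) x a = true := by
      intro a ha
      have := hBgt _ (pv_keyIn p B a ha)
      simp only [decide_eq_true_eq]; omega
    rw [hflat, pv_insertBy_append _ x _ _ hP, pv_insertBy_all_before _ x _ hS]
    unfold pvFlat
    rw [hSK, List.flatMap_append, List.flatMap_cons]
    have eA : A.flatMap (pvGrp (p ++ [x])) = A.flatMap (pvGrp p) := by
      apply List.flatMap_congr
      intro q hq
      rw [pv_grp_append]
      have := hA q hq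
      simp only [show ¬ x.2.2 = q by omega, if_false, List.append_nil]
    have eB : B.flatMap (pvGrp (p ++ [x])) = B.flatMap (pvGrp p) := by
      apply List.flatMap_congr
      intro q hq
      rw [pv_grp_append]
      have := hBgt q hq
      simp only [show ¬ x.2.2 = q by omega, if_false, List.append_nil]
    rw [eA, eB, pv_grp_append, if_pos rfl, hgv]
    simp

theorem pv_sort_flat (xs : List (Int × String × Int)) :
    PySem.List.sorted xs (fun bm => bm.2.2) false = pvFlat xs := by
  rw [PySem.List.sorted_eq_foldl_insertBy]
  have aux : ∀ (rest p : List (Int × String × Int)),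
      rest.foldl (fun acc x => PySem.List.insertBy (fun a b => decide (a.2.2 < b.2.2)) x acc)
        (pvFlat p) = pvFlat (p ++ rest) := by
    intro rest
    induction rest with
    | nil => intro p; simp
    | cons x rest ih =>
      intro p
      simp only [List.foldl_cons, pv_step p x]
      rw [ih (p ++ [x])]
      simp
  have h0 : pvFlat [] = [] := by
    simp [pvFlat, pvSK, PySem.Set.ofList]
  have := aux xs []
  rw [h0] at this
  simpa using this

theorem pv_foldl_append_map {α : Type} (f : α → String) (l : List α) :
    ∀ acc : List String, l.foldl (fun md e => md ++ [f e]) acc = acc ++ l.map f := by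
  induction l with
  | nil => simp
  | cons e l ih => intro acc; simp [ih, List.append_assoc]

theorem pv_foldA2 (hdr : Int → String) (g : Int → List String) (ks : List Int) :
    ∀ acc : List String,
      ks.foldl (fun md page => md ++ [hdr page] ++ g page) acc
        = acc ++ ks.flatMap (fun q => hdr q :: g q) := by
  induction ks with
  | nil => simp
  | cons q ks ih =>
    intro acc
    rw [List.foldl_cons, ih, List.flatMap_cons]
    simp [List.append_assoc]

theorem pv_foldA (E : Int → List (Int × String)) (ks : List Int) :
    ∀ acc : List String,
      ks.foldl
        (fun md_lines page =>
          (E page).foldl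
            (fun md_lines lt =>
              md_lines ++ [String.ofList (PySem.List.pyRepeat ['#'] lt.1) ++ " " ++ lt.2])
            (md_lines ++ ["<!-- page " ++ PySem.Int.toStr page ++ " -->"])) acc
      = acc ++ ks.flatMap (fun q => pvHdr q ::
          (E q).map (fun lt => String.ofList (PySem.List.pyRepeat ['#'] lt.1) ++ " " ++ lt.2)) := by
  intro acc
  simp only [pv_foldl_append_map]
  exact pv_foldA2 _ _ ks acc

theorem pv_A (xs : List (Int × String × Int)) :
    bookmark_list_to_md xs = PySem.Str.join "\n" (pvOut xs) := by
  have hunfold : bookmark_list_to_md xs = PySem.Str.join "\n"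
      (List.foldl
        (fun md_lines page =>
          List.foldl
            (fun md_lines lt =>
              md_lines ++ [String.ofList (PySem.List.pyRepeat ['#'] lt.1) ++ " " ++ lt.2])
            (md_lines ++ ["<!-- page " ++ PySem.Int.toStr page ++ " -->"])
            ((List.foldl (fun d bm => d.modify bm.2.2 [] (fun l => l ++ [(bm.1, bm.2.1)]))
                (PySem.Dict.empty : PySem.Dict Int (List (Int × String))) xs).getD page []))
        []
        (PySem.List.sorted
          (List.foldl (fun d bm => d.modify bm.2.2 [] (fun l => l ++ [(bm.1, bm.2.1)]))
              (PySem.Dict.empty : PySem.Dict Int (List (Int × String))) xs).keys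
          (fun p => p) false)) := rfl
  rw [hunfold]
  have hfold : xs.foldl (fun d bm => d.modify bm.2.2 [] (fun l => l ++ [(bm.1, bm.2.1)]))
        (PySem.Dict.empty : PySem.Dict Int (List (Int × String)))
      = (xs.map (fun bm => (bm.2.2, (bm.1, bm.2.1)))).foldl
          (fun d p => d.modify p.1 [] (fun l => l ++ [p.2])) PySem.Dict.empty := by
    rw [List.foldl_map]
  have hkeys : (xs.foldl (fun d bm => d.modify bm.2.2 [] (fun l => l ++ [(bm.1, bm.2.1)]))
        (PySem.Dict.empty : PySem.Dict Int (List (Int × String)))).keys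
      = PySem.Set.ofList (xs.map pvKey) := by
    rw [PySem.Dict.keys_foldl_modify_key xs (fun bm => bm.2.2) []
      (fun _ bm => fun l => l ++ [(bm.1, bm.2.1)]) PySem.Dict.empty]
    rw [PySem.Dict.keys_empty, PySem.Set.update_eq_append_filter]
    have : ∀ y : Int, PySem.Set.contains ([] : PySem.Set Int) y = false := fun y => rfl
    simp only [this, Bool.not_false, List.filter_true, List.nil_append]
    rfl
  have hgetD : ∀ q, (xs.foldl (fun d bm => d.modify bm.2.2 [] (fun l => l ++ [(bm.1, bm.2.1)]))
        (PySem.Dict.empty : PySem.Dict Int (List (Int × String)))).getD q []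
      = (pvGrp xs q).map (fun bm => (bm.1, bm.2.1)) := by
    intro q
    rw [hfold, PySem.Dict.getD_foldl_modify_append]
    simp [pvGrp, pvKey, List.filter_map, List.map_map, Function.comp_def]
  rw [pv_foldA]
  rw [hkeys]
  congr 1
  rw [List.nil_append, pvOut]
  apply List.flatMap_congr
  intro q hq
  rw [hgetD q, List.map_map]
  rfl

-- B's loop body, named so the run lemmas can speak about it (definitionally the port's lambda)
def pvStepB (st : List String × Option Int) (bm : Int × String × Int) :
    List String × Option Int :=
  let st := if st.2 ≠ some bm.2.2 then
      (st.1 ++ ["<!-- page " ++ PySem.Int.toStr bm.2.2 ++ " -->"], some bm.2.2)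
    else st
  (st.1 ++ [String.ofList (PySem.List.pyRepeat ['#'] bm.1) ++ " " ++ bm.2.1], st.2)

theorem pv_runIn (g : List (Int × String × Int)) (q : Int) (hg : ∀ a ∈ g, a.2.2 = q) :
    ∀ lines : List String,
      g.foldl pvStepB (lines, some q) = (lines ++ g.map pvHd, some q) := by
  induction g with
  | nil => simp
  | cons a g ih =>
    intro lines
    have ha : a.2.2 = q := hg a (by simp)
    have hstep : pvStepB (lines, some q) a = (lines ++ [pvHd a], some q) := by
      simp [pvStepB, pvHd, ha]
    simp only [List.foldl_cons, hstep, ih (fun b hb => hg b (by simp [hb]))]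
    simp [List.append_assoc]

theorem pv_runAll (xs : List (Int × String × Int)) (ks : List Int) :
    ∀ (cur : Option Int) (lines : List String),
      ks.Nodup → (∀ q ∈ ks, cur ≠ some q) → (∀ q ∈ ks, pvGrp xs q ≠ []) →
      ((ks.flatMap (pvGrp xs)).foldl pvStepB (lines, cur)).1
        = lines ++ ks.flatMap (fun q => pvHdr q :: (pvGrp xs q).map pvHd) := by
  induction ks with
  | nil => simp
  | cons q ks ih =>
    intro cur lines hnd hcur hne
    obtain ⟨a, g', hg⟩ := List.exists_cons_of_ne_nil (hne q (by simp))
    have hkeys : ∀ b ∈ pvGrp xs q, b.2.2 = q := by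
      intro b hb
      simpa [pvKey] using List.of_mem_filter hb
    have ha : a.2.2 = q := hkeys a (by rw [hg]; exact List.mem_cons_self)
    have hstep : pvStepB (lines, cur) a
        = ((lines ++ [pvHdr a.2.2]) ++ [pvHd a], some a.2.2) := by
      have : cur ≠ some a.2.2 := by rw [ha]; exact hcur q (by simp)
      simp [pvStepB, pvHd, pvHdr, this]
    rw [List.flatMap_cons, List.foldl_append, hg, List.foldl_cons, hstep, ha,
      pv_runIn g' q (fun b hb => hkeys b (by rw [hg]; exact List.mem_cons_of_mem a hb))]
    rw [ih (some q) _ (List.Nodup.of_cons hnd)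
      (fun q' hq' h => (List.nodup_cons.mp hnd).1 (by injection h with h; rw [h]; exact hq'))
      (fun q' hq' => hne q' (by simp [hq']))]
    simp [hg, List.append_assoc]

theorem pv_B (xs : List (Int × String × Int)) :
    bookmark_list_to_md_alt xs = PySem.Str.join "\n" (pvOut xs) := by
  have hb : bookmark_list_to_md_alt xs
      = PySem.Str.join "\n"
          (((PySem.List.sorted xs (fun bm => bm.2.2) false).foldl pvStepB ([], none)).1) := rfl
  rw [hb, pv_sort_flat, pvFlat]
  congr 1
  rw [pv_runAll xs (pvSK xs) none []
    ((pv_SK_pairwise xs).imp (fun h => ne_of_lt h))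
    (fun q _ h => by cases h)
    (fun q hq => by
      obtain ⟨bm, hbm, hk⟩ := List.mem_map.mp ((pv_mem_SK xs q).mp hq)
      exact List.ne_nil_of_mem (List.mem_filter.mpr ⟨hbm, by simp [pvKey]; exact hk⟩))]
  rw [List.nil_append, pvOut]

-- ===== VERDICT (by name: the statement is the Claim_ definition above) =====
theorem bookmark_list_to_md_spec : Claim_equal_bookmark_list_to_md := by
  intro xs _
  unfold Spec_bookmark_list_to_md
  rw [pv_A, pv_B]
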